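-- pv_equiv track=rewrite | github.com/Semih1997/CodingBat-Java-Problems-in-Python | Codingbat Java Array-2/QzeroMax.py | zeroMax
-- ===== SOURCE A (Python) =====
-- def zeroMax(a):
--     max_odd = 0                                 # tersten gelerek baktık ki zaten sonraki büyükler bizi ilgilendiriyo.
--     for i in range(len(a)):
--         if a[len(a)-1-i] % 2 == 1:
--             max_odd = max(max_odd,a[len(a)-1-i])
--         if a[len(a)-1-i] == 0:
--             a[len(a)-1-i] = max_odd
--     return a
-- ===== SOURCE B (Python) =====
-- def zeroMax(a):
--     for i in range(len(a)):
--         if a[i] == 0: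
--             best = 0
--             for x in a[i + 1:]:
--                 if x % 2 == 1:
--                     best = max(best, x)
--             a[i] = best
--     return a
-- ===== Notes on version B (the rewrite author's own statement) =====
-- stated objective: alternative
-- what changed: Replaces the single right-to-left pass carrying a running max-odd accumulator with a left-to-right pass that, at each zero, rescans the suffix to its right for the largest odd (floored at 0).
import Mathlib
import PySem

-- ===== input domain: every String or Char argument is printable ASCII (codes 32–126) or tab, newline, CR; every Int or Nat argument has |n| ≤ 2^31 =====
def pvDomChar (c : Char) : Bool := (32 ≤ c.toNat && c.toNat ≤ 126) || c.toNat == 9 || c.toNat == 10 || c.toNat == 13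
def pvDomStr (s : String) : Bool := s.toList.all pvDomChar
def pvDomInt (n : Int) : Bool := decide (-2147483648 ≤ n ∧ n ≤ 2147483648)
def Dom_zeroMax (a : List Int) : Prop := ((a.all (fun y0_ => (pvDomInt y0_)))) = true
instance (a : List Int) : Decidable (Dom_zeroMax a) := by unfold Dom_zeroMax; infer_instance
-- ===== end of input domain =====

-- B replaces A's single right-to-left max-odd accumulator pass with a left-to-right pass
-- that rescans the suffix at each zero (alternative decomposition, not faster).
-- Both Pythons mutate the argument list in place identically; the theorems are about the return value.

-- ===== PORT A =====
-- one step of A's loop body; Python re-evaluates a[len(a)-1-i] at each mention, so no let-binding;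
-- the index len(a)-1-i is always in range, so pyGetD/pySetD are exact here
def zeroMaxStep (st : List Int × Int) (i : Int) : List Int × Int :=
  ((if PySem.List.pyGetD st.1 ((st.1.length : Int) - 1 - i) 0 = 0
      then PySem.List.pySetD st.1 ((st.1.length : Int) - 1 - i)
        (if PySem.Int.mod (PySem.List.pyGetD st.1 ((st.1.length : Int) - 1 - i) 0) 2 = 1
           then max st.2 (PySem.List.pyGetD st.1 ((st.1.length : Int) - 1 - i) 0) else st.2)
      else st.1),
   (if PySem.Int.mod (PySem.List.pyGetD st.1 ((st.1.length : Int) - 1 - i) 0) 2 = 1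
      then max st.2 (PySem.List.pyGetD st.1 ((st.1.length : Int) - 1 - i) 0) else st.2))

def zeroMax (a : List Int) : List Int :=
  ((PySem.List.pyRange 0 (a.length : Int) 1).foldl zeroMaxStep (a, 0)).1

-- ===== PORT B =====
-- inner loop of Source B: best = 0; for x in a[i+1:]: if x % 2 == 1: best = max(best, x)
def altBest (xs : List Int) : Int :=
  xs.foldl (fun b x => if PySem.Int.mod x 2 = 1 then max b x else b) 0

-- Source B's outer loop left to right: when it reaches position i, everything right of i is still
-- the original suffix, so the loop is this structural recursion
def zeroMax_alt : List Int → List Int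
  | [] => []
  | x :: rest => (if x = 0 then altBest rest else x) :: zeroMax_alt rest

-- ===== PRECONDITION & SPEC =====
def Spec_zeroMax (a : List Int) (out : List Int) : Prop := out = zeroMax_alt a
instance (a : List Int) (out : List Int) : Decidable (Spec_zeroMax a out) := by unfold Spec_zeroMax; infer_instance

-- ===== CLAIM (what is proved, stated in full; the proofs are below) =====
def Claim_equal_zeroMax : Prop := ∀ (a : List Int), Dom_zeroMax a → Spec_zeroMax a (zeroMax a)

-- ===== LEMMAS AND PROOFS =====

-- foldr form of the "largest odd, floored at 0" maximum
def pvMR : List Int → Int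
  | [] => 0
  | x :: r => if PySem.Int.mod x 2 = 1 then max x (pvMR r) else pvMR r

theorem pvMR_nonneg (xs : List Int) : 0 ≤ pvMR xs := by
  induction xs with
  | nil => simp [pvMR]
  | cons x r ih =>
    unfold pvMR; split
    · exact le_trans ih (le_max_right x _)
    · exact ih

theorem foldl_best (xs : List Int) : ∀ b : Int, 0 ≤ b →
    xs.foldl (fun b x => if PySem.Int.mod x 2 = 1 then max b x else b) b = max b (pvMR xs) := by
  induction xs with
  | nil => intro b hb; unfold pvMR; simp; omega
  | cons x r ih =>
    intro b hb
    rw [List.foldl_cons]; unfold pvMR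
    split_ifs with h
    · rw [ih (max b x) (le_trans hb (le_max_left _ _)), max_assoc]
    · exact ih b hb

theorem altBest_eq (xs : List Int) : altBest xs = pvMR xs := by
  rw [altBest, foldl_best xs 0 le_rfl, max_eq_right (pvMR_nonneg xs)]

theorem length_zeroMax_alt (xs : List Int) : (zeroMax_alt xs).length = xs.length := by
  induction xs with
  | nil => rfl
  | cons x r ih => simp [zeroMax_alt, ih]

theorem getD_append_mid (pre s : List Int) (x d : Int) : (pre ++ x :: s).getD pre.length d = x := by
  induction pre with
  | nil => rfl
  | cons p pre ih => simpa using ih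

theorem set_append_mid (pre s : List Int) (x v : Int) : (pre ++ x :: s).set pre.length v = pre ++ v :: s := by
  induction pre with
  | nil => rfl
  | cons p pre ih => simpa using ih

-- A's loop, having already processed the suffix `tail` (replaced in place by zeroMax_alt tail,
-- accumulator = pvMR tail), continues on the prefix `pre` and yields B's result.
theorem loopA (pre : List Int) : ∀ tail : List Int,
    (PySem.List.pyRange (tail.length : Int) ((pre.length + tail.length : Nat) : Int) 1).foldl
      zeroMaxStep (pre ++ zeroMax_alt tail, pvMR tail)
    = (zeroMax_alt (pre ++ tail), pvMR (pre ++ tail)) := by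
  induction pre using List.reverseRecOn with
  | nil =>
    intro tail
    rw [PySem.List.pyRange_one_eq_nil (by simp)]
    simp
  | append_singleton pre' x ih =>
    intro tail
    have hlt : (tail.length : Int) < (((pre' ++ [x]).length + tail.length : Nat) : Int) := by
      have h : tail.length < (pre' ++ [x]).length + tail.length := by
        simp only [List.length_append, List.length_cons, List.length_nil]; omega
      exact_mod_cast h
    rw [PySem.List.pyRange_one_cons hlt, List.foldl_cons]
    have hl : (pre' ++ [x] ++ zeroMax_alt tail) = pre' ++ x :: zeroMax_alt tail := by simp
    have hlen : (pre' ++ [x] ++ zeroMax_alt tail).length = pre'.length + 1 + tail.length := by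
      simp only [List.length_append, List.length_cons, List.length_nil, length_zeroMax_alt]
    have hidx : ((pre' ++ [x] ++ zeroMax_alt tail).length : Int) - 1 - (tail.length : Int)
        = (pre'.length : Int) := by rw [hlen]; push_cast; ring
    have hget : PySem.List.pyGetD (pre' ++ [x] ++ zeroMax_alt tail) ((pre'.length : Int)) 0 = x := by
      rw [PySem.List.pyGetD_natCast, hl, getD_append_mid]
    have hstep : zeroMaxStep (pre' ++ [x] ++ zeroMax_alt tail, pvMR tail) (tail.length : Int)
        = (pre' ++ zeroMax_alt (x :: tail), pvMR (x :: tail)) := by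
      unfold zeroMaxStep
      simp only [hidx, hget]
      by_cases hx : x = 0
      · subst hx
        have hodd : ¬ PySem.Int.mod (0 : Int) 2 = 1 := by decide
        simp only [if_neg hodd]
        rw [PySem.List.pySetD_natCast, hl, set_append_mid]
        have h1 : zeroMax_alt ((0 : Int) :: tail) = pvMR tail :: zeroMax_alt tail := by
          simp [zeroMax_alt, altBest_eq]
        have h2 : pvMR ((0 : Int) :: tail) = pvMR tail := by
          simp [pvMR]
        simp [h1, h2]
      · simp only [if_neg hx]
        have h1 : zeroMax_alt (x :: tail) = x :: zeroMax_alt tail := by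
          simp only [zeroMax_alt]; rw [if_neg hx]
        rw [hl, h1]
        simp only [pvMR]
        split_ifs with hodd
        · rw [max_comm]
        · rfl
    rw [hstep]
    have harg1 : ((tail.length : Int) + 1) = (((x :: tail).length : Nat) : Int) := by
      simp only [List.length_cons]; push_cast; ring
    have harg2 : (((pre' ++ [x]).length + tail.length : Nat) : Int)
        = ((pre'.length + (x :: tail).length : Nat) : Int) := by
      simp only [List.length_append, List.length_cons, List.length_nil]; push_cast; ring
    rw [harg1, harg2, ih (x :: tail)]
    simp

-- ===== VERDICT (by name: the statement is the Claim_ definition above) =====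
theorem zeroMax_spec : Claim_equal_zeroMax := by
  intro a _
  unfold Spec_zeroMax zeroMax
  have h := loopA a []
  simp only [List.length_nil, Nat.add_zero, Nat.cast_zero, zeroMax_alt, pvMR, List.append_nil] at h
  rw [h]
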